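-- pv_equiv track=rewrite | github.com/ldobbelsteen/rubik | logic.py | cubie_facelets
-- ===== SOURCE A (Python) =====
-- def facelet_cubie(n: int, f: int, y: int, x: int) -> tuple[int, int, int]:
--     """Get the cubie on which a facelet is located."""
--     match f:
--         case 0:
--             return (x, y, 0)
--         case 1:
--             return (n - 1, y, x)
--         case 2:
--             return (n - 1 - x, y, n - 1)
--         case 3:
--             return (0, y, n - 1 - x)
--         case 4:
--             return (x, n - 1, y)
--         case 5:
--             return (x, 0, n - 1 - y)
--     raise Exception(f"invalid face: {f}")
--
-- def cubie_facelets(n: int, x: int, y: int, z: int) -> set[tuple[int, int, int]]: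
--     """Get the set of facelets of a cubie."""
--     facelets = set()
--     for ff in range(6):
--         for fy in range(n):
--             for fx in range(n):
--                 if facelet_cubie(n, ff, fy, fx) == (x, y, z):
--                     facelets.add((ff, fy, fx))
--     return facelets
-- ===== SOURCE B (Python) =====
-- def cubie_facelets(n: int, x: int, y: int, z: int) -> set[tuple[int, int, int]]:
--     """Get the set of facelets of a cubie, by inverting each face's mapping (O(1))."""
--     out = set()
--     for f, on_face, fy, fx in (
--         (0, z == 0, y, x),
--         (1, x == n - 1, y, z),
--         (2, z == n - 1, y, n - 1 - x),
--         (3, x == 0, y, n - 1 - z),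
--         (4, y == n - 1, z, x),
--         (5, y == 0, n - 1 - z, x),
--     ):
--         if on_face and 0 <= fy < n and 0 <= fx < n:
--             out.add((f, fy, fx))
--     return out
-- ===== Notes on version B (the rewrite author's own statement) =====
-- stated objective: faster
-- what changed: Instead of scanning all 6*n*n facelets and mapping each to its cubie, B inverts each face's affine facelet-to-cubie mapping, computing the single candidate facelet per face and keeping it if its coordinates are in range.
import Mathlib
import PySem

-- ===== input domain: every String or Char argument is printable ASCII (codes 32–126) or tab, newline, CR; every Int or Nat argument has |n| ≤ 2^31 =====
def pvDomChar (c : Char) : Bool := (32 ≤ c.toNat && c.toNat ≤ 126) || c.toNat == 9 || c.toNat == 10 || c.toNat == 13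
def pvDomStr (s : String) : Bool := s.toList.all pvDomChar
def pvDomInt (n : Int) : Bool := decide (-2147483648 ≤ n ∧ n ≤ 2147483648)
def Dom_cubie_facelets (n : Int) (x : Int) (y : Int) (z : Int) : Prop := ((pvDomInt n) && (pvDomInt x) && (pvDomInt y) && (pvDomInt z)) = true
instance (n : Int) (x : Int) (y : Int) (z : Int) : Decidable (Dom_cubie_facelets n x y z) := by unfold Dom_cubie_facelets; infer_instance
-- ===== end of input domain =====

-- B replaces A's O(n^2) scan over all facelets by inverting each face's mapping,
-- producing at most one candidate facelet per face in O(1).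

-- ===== PORT A =====
-- faithful port of facelet_cubie; 'none' models the 'raise' branch (never reached by A's calls)
def facelet_cubie (n : Int) (f : Int) (y : Int) (x : Int) : Option (Int × Int × Int) :=
  if f = 0 then some (x, y, 0)
  else if f = 1 then some (n - 1, y, x)
  else if f = 2 then some (n - 1 - x, y, n - 1)
  else if f = 3 then some (0, y, n - 1 - x)
  else if f = 4 then some (x, n - 1, y)
  else if f = 5 then some (x, 0, n - 1 - y)
  else none

def cubie_facelets (n : Int) (x : Int) (y : Int) (z : Int) : List (Int × Int × Int) :=
  (PySem.List.pyRange 0 6 1).foldl (fun s ff =>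
    (PySem.List.pyRange 0 n 1).foldl (fun s fy =>
      (PySem.List.pyRange 0 n 1).foldl (fun s fx =>
        if facelet_cubie n ff fy fx = some (x, y, z) then PySem.Set.add s (ff, fy, fx) else s)
        s) s) PySem.Set.empty

-- ===== PORT B =====
def cubie_facelets_alt (n : Int) (x : Int) (y : Int) (z : Int) : List (Int × Int × Int) :=
  ([(0, z == 0, y, x),
    (1, x == n - 1, y, z),
    (2, z == n - 1, y, n - 1 - x),
    (3, x == 0, y, n - 1 - z),
    (4, y == n - 1, z, x),
    (5, y == 0, n - 1 - z, x)] : List (Int × Bool × Int × Int)).foldl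
    (fun out t =>
      if t.2.1 && decide (0 ≤ t.2.2.1) && decide (t.2.2.1 < n)
           && decide (0 ≤ t.2.2.2) && decide (t.2.2.2 < n)
      then PySem.Set.add out (t.1, t.2.2.1, t.2.2.2) else out)
    PySem.Set.empty

-- ===== PRECONDITION & SPEC =====
def Spec_cubie_facelets (n : Int) (x : Int) (y : Int) (z : Int) (out : List (Int × Int × Int)) : Prop := out = cubie_facelets_alt n x y z
instance (n : Int) (x : Int) (y : Int) (z : Int) (out : List (Int × Int × Int)) : Decidable (Spec_cubie_facelets n x y z out) := by unfold Spec_cubie_facelets; infer_instance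

-- ===== CLAIM (what is proved, stated in full; the proofs are below) =====
def Claim_equal_cubie_facelets : Prop := ∀ (n : Int) (x : Int) (y : Int) (z : Int), Dom_cubie_facelets n x y z → Spec_cubie_facelets n x y z (cubie_facelets n x y z)

-- ===== LEMMAS AND PROOFS =====

-- a fold whose guard never fires on the list leaves the accumulator unchanged
theorem foldl_if_false {α : Type} (l : List Int) (c : Int → Prop) [inst : ∀ t, Decidable (c t)]
    (g : α → Int → α) (s : α) (hc : ∀ x ∈ l, ¬ c x) :
    l.foldl (fun s t => if c t then g s t else s) s = s := by
  induction l generalizing s with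
  | nil => rfl
  | cons h t ih =>
    simp [hc h (List.mem_cons_self), ih s (fun x hx => hc x (List.mem_cons_of_mem _ hx))]

-- a fold over a Nodup list whose guard fires at exactly one value applies g once
theorem foldl_guard {α : Type} (l : List Int) (hl : l.Nodup) (a : Int) (g : α → Int → α) (s : α) :
    l.foldl (fun s t => if t = a then g s t else s) s = if a ∈ l then g s a else s := by
  induction l generalizing s with
  | nil => simp
  | cons h t ih =>
    rcases List.nodup_cons.mp hl with ⟨hna, hnd⟩
    by_cases hha : h = a
    · subst hha
      simp only [List.foldl_cons, List.mem_cons, true_or, if_pos]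
      exact foldl_if_false t (fun x => x = h) g (g s h) (fun x hx he => hna (he ▸ hx))
    · have hah : ¬ (a = h) := fun e => hha e.symm
      simp [hha, ih hnd, hah]

-- the double loop over all (fy, fx) with condition 'p ∧ fy = b ∧ fx = a' adds e b a at most once
theorem double_fold {α : Type} (n : Int) (c : Int → Int → Prop) [∀ fy fx, Decidable (c fy fx)]
    (p : Prop) [Decidable p] (b a : Int) (e : Int → Int → α) (s : List α) [BEq α] [LawfulBEq α]
    (hc : ∀ fy fx, c fy fx ↔ p ∧ fy = b ∧ fx = a) :
    (PySem.List.pyRange 0 n 1).foldl (fun s1 fy =>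
      (PySem.List.pyRange 0 n 1).foldl (fun s2 fx =>
        if c fy fx then PySem.Set.add s2 (e fy fx) else s2) s1) s
    = if p ∧ (0 ≤ b ∧ b < n) ∧ (0 ≤ a ∧ a < n) then PySem.Set.add s (e b a) else s := by
  by_cases hp : p
  · have hinner : ∀ (s1 : List α) (fy : Int),
        (PySem.List.pyRange 0 n 1).foldl (fun s2 fx =>
          if c fy fx then PySem.Set.add s2 (e fy fx) else s2) s1
        = if fy = b then (if 0 ≤ a ∧ a < n then PySem.Set.add s1 (e b a) else s1) else s1 := by
      intro s1 fy
      by_cases hfy : fy = b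
      · subst hfy
        have hcc : ∀ fx, c fy fx ↔ fx = a := by
          intro fx; rw [hc]; tauto
        calc (PySem.List.pyRange 0 n 1).foldl (fun s2 fx =>
              if c fy fx then PySem.Set.add s2 (e fy fx) else s2) s1
            = (PySem.List.pyRange 0 n 1).foldl (fun s2 fx =>
              if fx = a then PySem.Set.add s2 (e fy fx) else s2) s1 := by
              apply PySem.List.foldl_congr_mem
              intro s2 fx _; simp only [hcc]
          _ = _ := by
              rw [foldl_guard _ (PySem.List.nodup_pyRange_one 0 n) a
                (fun s2 fx => PySem.Set.add s2 (e fy fx)) s1]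
              simp [PySem.List.mem_pyRange_one]
      · have hno : ∀ fx ∈ PySem.List.pyRange 0 n 1, ¬ c fy fx := by
          intro fx _ h; exact hfy ((hc fy fx).mp h).2.1
        simp [hfy, foldl_if_false _ (c fy) _ s1 hno]
    calc (PySem.List.pyRange 0 n 1).foldl (fun s1 fy =>
          (PySem.List.pyRange 0 n 1).foldl (fun s2 fx =>
            if c fy fx then PySem.Set.add s2 (e fy fx) else s2) s1) s
        = (PySem.List.pyRange 0 n 1).foldl (fun s1 fy =>
            if fy = b then (if 0 ≤ a ∧ a < n then PySem.Set.add s1 (e b a) else s1) else s1) s := by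
          apply PySem.List.foldl_congr_mem
          intro s1 fy _; exact hinner s1 fy
      _ = _ := by
          rw [foldl_guard _ (PySem.List.nodup_pyRange_one 0 n) b
            (fun s1 _ => if 0 ≤ a ∧ a < n then PySem.Set.add s1 (e b a) else s1) s]
          simp only [PySem.List.mem_pyRange_one]
          by_cases hb : 0 ≤ b ∧ b < n <;> by_cases ha : 0 ≤ a ∧ a < n <;>
            simp [hp, hb, ha]
  · have hno : ∀ fy fx, ¬ c fy fx := by intro fy fx h; exact hp ((hc fy fx).mp h).1
    have houter : ∀ (s1 : List α) (fy : Int),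
        (PySem.List.pyRange 0 n 1).foldl (fun s2 fx =>
          if c fy fx then PySem.Set.add s2 (e fy fx) else s2) s1 = s1 := by
      intro s1 fy; exact foldl_if_false _ (c fy) _ s1 (fun x _ => hno fy x)
    simp only [houter, PySem.List.foldl_ignore]
    simp [hp]

theorem cubie_facelets_eq_alt (n x y z : Int) :
    cubie_facelets n x y z = cubie_facelets_alt n x y z := by
  have hr6 : PySem.List.pyRange 0 6 1 = [0, 1, 2, 3, 4, 5] := by decide
  unfold cubie_facelets
  rw [hr6]
  simp only [List.foldl_cons, List.foldl_nil]
  rw [double_fold n (fun fy fx => facelet_cubie n 0 fy fx = some (x, y, z)) (z = 0) y x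
        (fun fy fx => ((0 : Int), fy, fx))
        (hc := by intro fy fx; simp [facelet_cubie, Prod.ext_iff]; omega),
      double_fold n (fun fy fx => facelet_cubie n 1 fy fx = some (x, y, z)) (x = n - 1) y z
        (fun fy fx => ((1 : Int), fy, fx))
        (hc := by intro fy fx; simp [facelet_cubie, Prod.ext_iff]; omega),
      double_fold n (fun fy fx => facelet_cubie n 2 fy fx = some (x, y, z)) (z = n - 1) y (n - 1 - x)
        (fun fy fx => ((2 : Int), fy, fx))
        (hc := by intro fy fx; simp [facelet_cubie, Prod.ext_iff]; omega),
      double_fold n (fun fy fx => facelet_cubie n 3 fy fx = some (x, y, z)) (x = 0) y (n - 1 - z)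
        (fun fy fx => ((3 : Int), fy, fx))
        (hc := by intro fy fx; simp [facelet_cubie, Prod.ext_iff]; omega),
      double_fold n (fun fy fx => facelet_cubie n 4 fy fx = some (x, y, z)) (y = n - 1) z x
        (fun fy fx => ((4 : Int), fy, fx))
        (hc := by intro fy fx; simp [facelet_cubie, Prod.ext_iff]; omega),
      double_fold n (fun fy fx => facelet_cubie n 5 fy fx = some (x, y, z)) (y = 0) (n - 1 - z) x
        (fun fy fx => ((5 : Int), fy, fx))
        (hc := by intro fy fx; simp [facelet_cubie, Prod.ext_iff]; omega)]
  unfold cubie_facelets_alt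
  simp only [List.foldl_cons, List.foldl_nil, Bool.and_eq_true, beq_iff_eq,
    decide_eq_true_eq, and_assoc]

-- ===== VERDICT (by name: the statement is the Claim_ definition above) =====
theorem cubie_facelets_spec : Claim_equal_cubie_facelets := by
  intro n x y z _
  unfold Spec_cubie_facelets
  exact cubie_facelets_eq_alt n x y z
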